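-- pv_equiv track=rewrite | github.com/mleue/project_euler | problem_0095/python/e0095.py | get_longest_amicable_chain
-- ===== SOURCE A (Python) =====
-- def get_longest_amicable_chain(div_sums):
--   """Return first element of longest amicable chain of divisor sums."""
--   longest_count, longest_start = 0, None
--   for start in div_sums.keys():
--     if not div_sums[start] > start:
--       continue
--     chain, el = set(), start
--     while True:
--       chain.add(el)
--       el = div_sums[el]
--       if el == start:
--         if len(chain) > longest_count:
--           longest_count, longest_start = len(chain), start
--           break
--       elif el not in div_sums or el in chain:
--         break
--
--   return longest_count, longest_start
-- ===== SOURCE B (Python) =====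
-- def get_longest_amicable_chain(div_sums):
--   """Return first element of longest amicable chain of divisor sums."""
--   n = len(div_sums)
--   best_count, best_start = 0, None
--   for start in div_sums:
--     if div_sums[start] > start:
--       length = _cycle_length(div_sums, start, n)
--       if length > best_count:
--         best_count, best_start = length, start
--   return best_count, best_start
--
--
-- def _cycle_length(div_sums, start, n):
--   """Smallest k in 1..n with the k-th successor of start equal to start, else 0
--   (also 0 when the walk leaves the map)."""
--   el = start
--   for k in range(1, n + 1):
--     if el not in div_sums:
--       return 0
--     el = div_sums[el]
--     if el == start:
--       return k
--   return 0
-- ===== Notes on version B (the rewrite author's own statement) =====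
-- stated objective: alternative
-- what changed: A detects a cycle by growing a visited set per start and breaking on membership; B drops the set entirely and computes each start's cycle length as the minimal k <= len(div_sums) with f^k(start) == start via a bounded counting walk, then folds the max.
import Mathlib
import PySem

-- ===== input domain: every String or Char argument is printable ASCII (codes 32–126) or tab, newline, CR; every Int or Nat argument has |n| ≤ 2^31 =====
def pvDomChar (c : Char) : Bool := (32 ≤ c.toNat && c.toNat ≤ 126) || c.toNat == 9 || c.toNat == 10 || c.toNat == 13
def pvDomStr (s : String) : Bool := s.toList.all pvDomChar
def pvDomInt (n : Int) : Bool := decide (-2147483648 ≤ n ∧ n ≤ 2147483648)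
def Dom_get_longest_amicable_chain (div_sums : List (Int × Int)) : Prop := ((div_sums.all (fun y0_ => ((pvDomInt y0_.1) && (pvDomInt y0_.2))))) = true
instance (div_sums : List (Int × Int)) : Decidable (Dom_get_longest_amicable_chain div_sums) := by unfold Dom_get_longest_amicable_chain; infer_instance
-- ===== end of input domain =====

-- B replaces A's set-based chain walk (visited set, early break on a repeat) by a bounded
-- minimal-period search: walk at most len(div_sums) steps counting until the walk returns to
-- its start; objective: alternative (no set bookkeeping; same asymptotic cost).

-- ===== PORT A =====
-- A's inner `while True` loop; state (chain, el), accumulator acc = (longest_count, longest_start).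
-- fuel only bounds the recursion; the proofs show it is never exhausted.
def amChain (d : PySem.Dict Int Int) (start : Int) :
    Nat → PySem.Set Int → Int → Int × Option Int → Int × Option Int
  | 0, _chain, _el, acc => acc
  | fuel+1, chain, el, acc =>
    let chain' := PySem.Set.add chain el
    match PySem.Dict.get? d el with
    | none => acc   -- Python's `div_sums[el]` would raise KeyError; unreachable (el is always a key here)
    | some el2 =>
      if el2 = start then
        (if PySem.Set.len chain' > acc.1 then (PySem.Set.len chain', some start)
         else amChain d start fuel chain' el2 acc)
      else if (!PySem.Dict.contains d el2) || PySem.Set.contains chain' el2 then acc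
      else amChain d start fuel chain' el2 acc

def get_longest_amicable_chain (div_sums : List (Int × Int)) : Int × Option Int :=
  let d := PySem.Dict.ofList div_sums
  (PySem.Dict.keys d).foldl
    (fun acc start =>
      match PySem.Dict.get? d start with
      | none => acc   -- unreachable: start ∈ keys
      | some v =>
        if ¬ (v > start) then acc
        else amChain d start (d.size + 3) PySem.Set.empty start acc)
    (0, none)

-- ===== PORT B =====
-- B's helper `_cycle_length`: `for k in range(1, n+1)` walking `el` (membership test `el in d`
-- and the lookup `d[el]` are one `get?` match: `el in d` ↔ `get? d el ≠ none`).
def cycB (d : PySem.Dict Int Int) (start : Int) : Nat → Int → Int → Int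
  | 0, _el, _k => 0
  | fuel+1, el, k =>
    match PySem.Dict.get? d el with
    | none => 0
    | some el2 => if el2 = start then k else cycB d start fuel el2 (k + 1)

def get_longest_amicable_chain_alt (div_sums : List (Int × Int)) : Int × Option Int :=
  let d := PySem.Dict.ofList div_sums
  let n := d.size
  (PySem.Dict.keys d).foldl
    (fun acc start =>
      match PySem.Dict.get? d start with
      | none => acc   -- unreachable: start ∈ keys
      | some v =>
        if v > start then
          (if cycB d start n start 1 > acc.1 then (cycB d start n start 1, some start) else acc)
        else acc)
    (0, none)

-- ===== PRECONDITION & SPEC =====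
def Spec_get_longest_amicable_chain (div_sums : List (Int × Int)) (out : Int × Option Int) : Prop := out = get_longest_amicable_chain_alt div_sums
instance (div_sums : List (Int × Int)) (out : Int × Option Int) : Decidable (Spec_get_longest_amicable_chain div_sums out) := by unfold Spec_get_longest_amicable_chain; infer_instance

-- ===== CLAIM (what is proved, stated in full; the proofs are below) =====
def Claim_equal_get_longest_amicable_chain : Prop := ∀ (div_sums : List (Int × Int)), Dom_get_longest_amicable_chain div_sums → Spec_get_longest_amicable_chain div_sums (get_longest_amicable_chain div_sums)

-- ===== LEMMAS AND PROOFS =====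

-- j-fold iteration of the successor map `x ↦ d[x]` (none once the walk leaves the dict)
def iterF (d : PySem.Dict Int Int) : Nat → Int → Option Int
  | 0, x => some x
  | n+1, x =>
    match PySem.Dict.get? d x with
    | none => none
    | some y => iterF d n y

lemma iterF_one (d : PySem.Dict Int Int) (x : Int) : iterF d 1 x = PySem.Dict.get? d x := by
  cases h : PySem.Dict.get? d x <;> simp [iterF, h]

lemma iterF_add (d : PySem.Dict Int Int) (a b : Nat) (x : Int) :
    iterF d (a + b) x = (iterF d a x).bind (iterF d b) := by
  induction a generalizing x with
  | zero => simp [iterF]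
  | succ a ih =>
    have : a + 1 + b = (a + b) + 1 := by omega
    rw [this]
    cases h : PySem.Dict.get? d x with
    | none => simp [iterF, h]
    | some y => simp [iterF, h, ih]

lemma iterF_succ_right (d : PySem.Dict Int Int) (n : Nat) (x : Int) :
    iterF d (n + 1) x = (iterF d n x).bind (PySem.Dict.get? d) := by
  rw [iterF_add d n 1 x]
  cases iterF d n x <;> simp [iterF_one]

-- if no iterate of el ever returns to start, `_cycle_length`'s loop never fires its return-k branch
lemma cycB_eq_zero (d : PySem.Dict Int Int) (start : Int) :
    ∀ (fuel : Nat) (el k : Int), (∀ j : Nat, 1 ≤ j → iterF d j el ≠ some start) →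
      cycB d start fuel el k = 0 := by
  intro fuel
  induction fuel with
  | zero => intro el k _; rfl
  | succ fuel ih =>
    intro el k h
    cases hg : PySem.Dict.get? d el with
    | none => simp [cycB, hg]
    | some el2 =>
      have hne : el2 ≠ start := by
        intro he
        exact h 1 (by omega) (by rw [iterF_one, hg, he])
      simp only [cycB, hg, if_neg hne]
      exact ih el2 (k + 1) (fun j hj hc => h (j + 1) (by omega)
        (by rw [Nat.add_comm, iterF_add, iterF_one, hg]; simpa using hc))

-- orbit value at each visited position: (P ++ [el])[i] is the i-th iterate of start
lemma orbit_at (d : PySem.Dict Int Int) (start : Int) (P : List Int) (el : Int)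
    (hlen : iterF d P.length start = some el)
    (horb : ∀ i (h : i < P.length), iterF d i start = some P[i]) :
    ∀ i (h : i < P.length + 1), iterF d i start = some ((P ++ [el])[i]'(by simpa using h)) := by
  intro i h
  rcases Nat.lt_or_ge i P.length with h' | h'
  · rw [horb i h']
    congr 1
    exact (List.getElem_append_left h').symm
  · have hi : i = P.length := by omega
    subst hi
    rw [hlen]
    congr 1
    exact (List.getElem_concat_length rfl (by simp)).symm

-- everything the walk visits is a key of the dict
lemma orbit_subset_keys (d : PySem.Dict Int Int) (start : Int) (P : List Int) (el : Int)
    (hlen : iterF d P.length start = some el)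
    (horb : ∀ i (h : i < P.length), iterF d i start = some P[i])
    (hel : PySem.Dict.contains d el = true) :
    ∀ x ∈ P ++ [el], x ∈ PySem.Dict.keys d := by
  intro x hx
  rcases List.mem_append.1 hx with hx | hx
  · obtain ⟨i, hi, rfl⟩ := List.getElem_of_mem hx
    have h1 : iterF d (i + 1) start ≠ none := by
      rcases Nat.lt_or_ge (i + 1) P.length with h | h
      · rw [horb (i + 1) h]; simp
      · have hip : i + 1 = P.length := by omega
        rw [hip, hlen]; simp
    rw [iterF_succ_right, horb i hi] at h1
    simp only [Option.bind_some] at h1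
    have hcont : PySem.Dict.contains d P[i] = true := by
      rcases Bool.eq_false_or_eq_true (PySem.Dict.contains d P[i]) with ht | hf
      · exact ht
      · exact absurd ((PySem.Dict.get?_eq_none_iff_contains d P[i]).2 hf) h1
    exact (PySem.Dict.contains_iff_mem_keys d P[i]).1 hcont
  · have hx' : x = el := by simpa using hx
    subst hx'
    exact (PySem.Dict.contains_iff_mem_keys d x).1 hel

-- MAIN LEMMA: A's while-loop, at orbit position P.length with visited set P (in visit order)
-- and current element el, produces exactly B's accumulator update with B's bounded period search.
lemma amChain_eq_cycB (d : PySem.Dict Int Int) (start v : Int)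
    (hv : PySem.Dict.get? d start = some v) (hvne : v ≠ start) :
    ∀ (fa : Nat) (P : List Int) (el : Int) (acc : Int × Option Int),
      iterF d P.length start = some el →
      (∀ i (h : i < P.length), iterF d i start = some P[i]) →
      (P ++ [el]).Nodup →
      PySem.Dict.contains d el = true →
      (PySem.Dict.keys d).length + 2 ≤ fa + P.length →
      0 ≤ acc.1 →
      amChain d start fa P el acc =
        (if cycB d start ((PySem.Dict.keys d).length - P.length) el ((P.length : Int) + 1) > acc.1
         then (cycB d start ((PySem.Dict.keys d).length - P.length) el ((P.length : Int) + 1), some start)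
         else acc) := by
  intro fa
  induction fa with
  | zero =>
    intro P el acc hlen horb hnd hel hfa hacc
    exfalso
    have hsub := orbit_subset_keys d start P el hlen horb hel
    have hle : (P ++ [el]).length ≤ (PySem.Dict.keys d).length :=
      (List.subperm_of_subset hnd hsub).length_le
    simp at hle; omega
  | succ fa ih =>
    intro P el acc hlen horb hnd hel hfa hacc
    have hsub := orbit_subset_keys d start P el hlen horb hel
    have hKm : P.length + 1 ≤ (PySem.Dict.keys d).length := by
      have hle : (P ++ [el]).length ≤ (PySem.Dict.keys d).length :=
        (List.subperm_of_subset hnd hsub).length_le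
      simpa using hle
    have helP : el ∉ P := by
      have h := hnd
      simp [List.nodup_append] at h
      exact fun hm => h.2 el hm rfl
    have hadd : PySem.Set.add P el = P ++ [el] := PySem.Set.add_of_not_mem helP
    obtain ⟨el2, hel2⟩ : ∃ el2, PySem.Dict.get? d el = some el2 := by
      have hc := hel
      rw [PySem.Dict.contains_eq_isSome_get?] at hc
      exact Option.isSome_iff_exists.1 hc
    have ho' : iterF d (P.length + 1) start = some el2 := by
      rw [iterF_succ_right, hlen, Option.bind_some, hel2]
    obtain ⟨t, ht, ht'⟩ : ∃ t, (PySem.Dict.keys d).length - P.length = t + 1 ∧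
        t = (PySem.Dict.keys d).length - (P.length + 1) :=
      ⟨(PySem.Dict.keys d).length - (P.length + 1), by omega, rfl⟩
    rw [ht]
    have hcyc : cycB d start (t + 1) el ((P.length : Int) + 1) =
        (if el2 = start then ((P.length : Int) + 1)
         else cycB d start t el2 ((P.length : Int) + 1 + 1)) := by
      simp only [cycB, hel2]
    rw [hcyc]
    show (let chain' := PySem.Set.add P el;
      match PySem.Dict.get? d el with
      | none => acc
      | some w =>
        if w = start then
          (if PySem.Set.len chain' > acc.1 then (PySem.Set.len chain', some start)
           else amChain d start fa chain' w acc)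
        else if (!PySem.Dict.contains d w) || PySem.Set.contains chain' w then acc
        else amChain d start fa chain' w acc) = _
    simp only [hadd, hel2]
    by_cases hstart : el2 = start
    · rw [if_pos hstart, if_pos hstart]
      have hlenset : PySem.Set.len (P ++ [el]) = (P.length : Int) + 1 := by
        simp [PySem.Set.len]
      rw [hlenset]
      by_cases hrec : (P.length : Int) + 1 > acc.1
      · rw [if_pos hrec, if_pos hrec]
      · rw [if_neg hrec, if_neg hrec, hstart]
        -- A continues once more and then breaks on revisiting d[start]
        have hm1 : 1 ≤ P.length := by
          by_contra h
          have h0 : P.length = 0 := by omega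
          have he2 : iterF d 1 start = some el2 := by rw [← ho', h0]
          rw [iterF_one, hv] at he2
          exact hvne (by injection he2 with h'; exact h'.trans hstart)
        have hstartmem : start ∈ P ++ [el] := by
          have h0 := orbit_at d start P el hlen horb 0 (by omega)
          have hz : iterF d 0 start = some start := rfl
          rw [hz] at h0
          have h0' : (P ++ [el])[0]'(by simp) = start := by injection h0 with h0; exact h0.symm
          rw [← h0']; exact List.getElem_mem _
        have hadd2 : PySem.Set.add (P ++ [el]) start = P ++ [el] :=
          PySem.Set.add_of_mem hstartmem
        obtain ⟨fa2, rfl⟩ : ∃ fa2, fa = fa2 + 1 := ⟨fa - 1, by omega⟩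
        have hvmem : v ∈ P ++ [el] := by
          have h1 : iterF d 1 start = some v := by rw [iterF_one, hv]
          have h1' := orbit_at d start P el hlen horb 1 (by omega)
          rw [h1] at h1'
          have hveq : v = (P ++ [el])[1]'(by simp; omega) := by injection h1'
          rw [hveq]; exact List.getElem_mem _
        have hcv : PySem.Set.contains (P ++ [el]) v = true :=
          (PySem.Set.contains_iff _ _).2 hvmem
        show (let chain' := PySem.Set.add (P ++ [el]) start;
          match PySem.Dict.get? d start with
          | none => acc
          | some w =>
            if w = start then
              (if PySem.Set.len chain' > acc.1 then (PySem.Set.len chain', some start)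
               else amChain d start fa2 chain' w acc)
            else if (!PySem.Dict.contains d w) || PySem.Set.contains chain' w then acc
            else amChain d start fa2 chain' w acc) = acc
        simp only [hadd2, hv, if_neg hvne, hcv, Bool.or_true, if_true]
    · rw [if_neg hstart, if_neg hstart]
      by_cases hc2 : PySem.Dict.contains d el2 = true
      · by_cases hmem2 : el2 ∈ P ++ [el]
        · -- A breaks on the revisit; B can never return to start any more
          have hcel2 : PySem.Set.contains (P ++ [el]) el2 = true :=
            (PySem.Set.contains_iff _ _).2 hmem2
          rw [if_pos (by rw [hcel2, Bool.or_true])]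
          have hnoret : ∀ j : Nat, 1 ≤ j → iterF d j el2 ≠ some start := by
            intro j hj hcon
            obtain ⟨i, hi, heq⟩ := List.getElem_of_mem hmem2
            have hi' : i < P.length + 1 := by simpa using hi
            have hoi : iterF d i start = some el2 := by
              rw [orbit_at d start P el hlen horb i hi', heq]
            have hS : ∃ c, 1 ≤ c ∧ iterF d c start = some start :=
              ⟨i + j, by omega, by rw [iterF_add, hoi, Option.bind_some]; exact hcon⟩
            have hc0 := Nat.find_spec hS
            have hnr : ∀ s, 1 ≤ s → s ≤ P.length + 1 → iterF d s start ≠ some start := by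
              intro s h1 h2 hcontra
              rcases Nat.lt_or_ge s (P.length + 1) with hs | hs
              · have ha := orbit_at d start P el hlen horb s hs
                rw [hcontra] at ha
                have h0 := orbit_at d start P el hlen horb 0 (by omega)
                have hz : iterF d 0 start = some start := rfl
                rw [hz] at h0
                have heqi : (P ++ [el])[0]'(by simp) = (P ++ [el])[s]'(by simpa using hs) := by
                  have e0 : start = (P ++ [el])[0]'(by simp) := by injection h0
                  have es : start = (P ++ [el])[s]'(by simpa using hs) := by injection ha
                  rw [← e0, ← es]
                have := (List.Nodup.getElem_inj_iff hnd).mp heqi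
                omega
              · have hs' : s = P.length + 1 := by omega
                rw [hs', ho'] at hcontra
                exact hstart (by injection hcontra)
            have hge : P.length + 2 ≤ Nat.find hS := by
              by_contra h
              exact hnr (Nat.find hS) hc0.1 (by omega) hc0.2
            have e1 : iterF d (Nat.find hS - (P.length + 1)) el2 = some start := by
              have e0 : iterF d ((P.length + 1) + (Nat.find hS - (P.length + 1))) start
                  = some start := by
                rw [show (P.length + 1) + (Nat.find hS - (P.length + 1)) = Nat.find hS from by omega]
                exact hc0.2
              rw [iterF_add, ho', Option.bind_some] at e0
              exact e0
            have e2 : iterF d (i + (Nat.find hS - (P.length + 1))) start = some start := by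
              rw [iterF_add, hoi, Option.bind_some]; exact e1
            exact Nat.find_min hS (show i + (Nat.find hS - (P.length + 1)) < Nat.find hS by omega)
              ⟨by omega, e2⟩
          rw [cycB_eq_zero d start t el2 _ hnoret]
          rw [if_neg (by omega)]
        · -- both sides advance one step: apply the induction hypothesis at P ++ [el]
          have hcel2 : PySem.Set.contains (P ++ [el]) el2 = false := by
            rcases Bool.eq_false_or_eq_true (PySem.Set.contains (P ++ [el]) el2) with htt | hf
            · exact absurd ((PySem.Set.contains_iff _ _).1 htt) hmem2
            · exact hf
          rw [if_neg (by rw [hc2, hcel2]; decide)]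
          have hlen' : iterF d (P ++ [el]).length start = some el2 := by
            simpa using ho'
          have horb' : ∀ i (h : i < (P ++ [el]).length), iterF d i start = some ((P ++ [el])[i]) := by
            intro i h
            exact orbit_at d start P el hlen horb i (by simpa using h)
          have hnd' : ((P ++ [el]) ++ [el2]).Nodup := by
            rw [List.nodup_append]
            exact ⟨hnd, List.nodup_singleton el2,
              fun x hx => by simp; intro hx'; subst hx'; exact hmem2 hx⟩
          have hIH := ih (P ++ [el]) el2 acc hlen' horb' hnd' hc2
            (by simp; omega) hacc
          rw [hIH]
          have hlencast : (((P ++ [el]).length : Nat) : Int) + 1 = (P.length : Int) + 1 + 1 := by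
            simp only [List.length_append, List.length_singleton]; push_cast; ring
          have htt2 : (PySem.Dict.keys d).length - (P ++ [el]).length = t := by
            simp only [ht', List.length_append, List.length_singleton]
          rw [htt2, hlencast]
      · -- the walk leaves the dict: A breaks, B returns 0
        have hc2' : PySem.Dict.contains d el2 = false := by
          rcases Bool.eq_false_or_eq_true (PySem.Dict.contains d el2) with htt | hf
          · exact absurd htt hc2
          · exact hf
        rw [if_pos (by rw [hc2', Bool.not_false, Bool.true_or])]
        have hg2 : PySem.Dict.get? d el2 = none :=
          (PySem.Dict.get?_eq_none_iff_contains d el2).2 hc2'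
        have hz : cycB d start t el2 ((P.length : Int) + 1 + 1) = 0 := by
          cases t <;> simp [cycB, hg2]
        rw [hz, if_neg (by omega)]

lemma size_eq_keys_length (d : PySem.Dict Int Int) : d.size = (PySem.Dict.keys d).length := by
  simp [PySem.Dict.size, PySem.Dict.keys]

lemma fold_eq (d : PySem.Dict Int Int) :
    ∀ (ks : List Int), (∀ s ∈ ks, PySem.Dict.contains d s = true) →
      ∀ (acc : Int × Option Int), 0 ≤ acc.1 →
      ks.foldl
        (fun acc start =>
          match PySem.Dict.get? d start with
          | none => acc
          | some v =>
            if ¬ (v > start) then acc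
            else amChain d start (d.size + 3) PySem.Set.empty start acc) acc =
      ks.foldl
        (fun acc start =>
          match PySem.Dict.get? d start with
          | none => acc
          | some v =>
            if v > start then
              (if cycB d start d.size start 1 > acc.1 then (cycB d start d.size start 1, some start) else acc)
            else acc) acc := by
  intro ks
  induction ks with
  | nil => intro _ acc _; rfl
  | cons s ks ih =>
    intro hmem acc hacc
    have hc : PySem.Dict.contains d s = true := hmem s (by simp)
    obtain ⟨v, hv⟩ : ∃ v, PySem.Dict.get? d s = some v := by
      have h := hc
      rw [PySem.Dict.contains_eq_isSome_get?] at h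
      exact Option.isSome_iff_exists.1 h
    simp only [List.foldl_cons, hv]
    by_cases hgt : v > s
    · rw [if_neg (not_not_intro hgt), if_pos hgt]
      have hvne : v ≠ s := ne_of_gt hgt
      have hkey := amChain_eq_cycB d s v hv hvne (d.size + 3) [] s acc rfl
        (by intro i h; simp at h)
        (by simp)
        hc
        (by rw [size_eq_keys_length]; simp only [List.length_nil]; omega)
        hacc
      simp only [List.length_nil, Nat.sub_zero, Nat.cast_zero, zero_add] at hkey
      rw [← size_eq_keys_length] at hkey
      rw [show amChain d s (d.size + 3) PySem.Set.empty s acc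
            = amChain d s (d.size + 3) [] s acc from rfl, hkey]
      set c := cycB d s d.size s 1 with hcyc
      by_cases hr : c > acc.1
      · rw [if_pos hr]
        exact ih (fun x hx => hmem x (List.mem_cons_of_mem s hx)) (c, some s)
          (by show (0:Int) ≤ c; omega)
      · rw [if_neg hr]
        exact ih (fun x hx => hmem x (List.mem_cons_of_mem s hx)) acc hacc
    · rw [if_pos hgt, if_neg hgt]
      exact ih (fun x hx => hmem x (List.mem_cons_of_mem s hx)) acc hacc

-- ===== VERDICT (by name: the statement is the Claim_ definition above) =====
theorem get_longest_amicable_chain_spec : Claim_equal_get_longest_amicable_chain := by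
  intro div_sums _hdom
  show get_longest_amicable_chain div_sums = get_longest_amicable_chain_alt div_sums
  exact fold_eq (PySem.Dict.ofList div_sums) _
    (fun s hs => (PySem.Dict.contains_iff_mem_keys _ s).mpr hs) (0, none) le_rfl
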